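-- pv_equiv track=rewrite | github.com/groupthinking/vision | self-correcting-executor-PRODUCTION/agents/specialized/code_analysis_subagents.py | _generate_style_recommendations
-- ===== SOURCE A (Python) =====
-- from typing import Dict, List, Any, Optional
--
-- def _generate_style_recommendations(style_issues: List, naming_issues: List, doc_issues: List) -> List[str]:
--     """Generate actionable style recommendations"""
--     recommendations = []
--
--     if any(issue["type"] == "line_length" for issue in style_issues):
--         recommendations.append("Consider breaking long lines to improve readability")
--
--     if any(issue["type"] == "indentation" for issue in style_issues):
--         recommendations.append("Use consistent indentation (4 spaces recommended for Python)")
--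
--     if naming_issues:
--         recommendations.append("Follow language naming conventions (snake_case for functions, PascalCase for classes)")
--
--     if doc_issues:
--         recommendations.append("Add docstrings to functions and classes for better documentation")
--
--     if not recommendations:
--         recommendations.append("Code follows good style practices")
--
--     return recommendations
-- ===== SOURCE B (Python) =====
-- _STYLE_RULES = [
--     ("line_length", "Consider breaking long lines to improve readability"),
--     ("indentation", "Use consistent indentation (4 spaces recommended for Python)"),
-- ]
--
--
-- def _generate_style_recommendations(style_issues, naming_issues, doc_issues):
--     """Table-driven: scan style_issues once, shrinking a worklist set of pending
--     rule types (stopping early when it empties), then emit messages from the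
--     rules table for every type that was found."""
--     pending = {t for t, _ in _STYLE_RULES}
--     for issue in style_issues:
--         if not pending:
--             break
--         pending.discard(issue["type"])
--     recommendations = [msg for t, msg in _STYLE_RULES if t not in pending]
--     if naming_issues:
--         recommendations.append("Follow language naming conventions (snake_case for functions, PascalCase for classes)")
--     if doc_issues:
--         recommendations.append("Add docstrings to functions and classes for better documentation")
--     return recommendations or ["Code follows good style practices"]
-- ===== Notes on version B (the rewrite author's own statement) =====
-- stated objective: alternative
-- what changed: Replaces A's two separate any() scans and hard-coded if/append chain for style messages by a declarative rules table plus a single worklist pass that shrinks a set of pending rule types (breaking when empty) and then emits messages by filtering the table.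
import Mathlib
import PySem

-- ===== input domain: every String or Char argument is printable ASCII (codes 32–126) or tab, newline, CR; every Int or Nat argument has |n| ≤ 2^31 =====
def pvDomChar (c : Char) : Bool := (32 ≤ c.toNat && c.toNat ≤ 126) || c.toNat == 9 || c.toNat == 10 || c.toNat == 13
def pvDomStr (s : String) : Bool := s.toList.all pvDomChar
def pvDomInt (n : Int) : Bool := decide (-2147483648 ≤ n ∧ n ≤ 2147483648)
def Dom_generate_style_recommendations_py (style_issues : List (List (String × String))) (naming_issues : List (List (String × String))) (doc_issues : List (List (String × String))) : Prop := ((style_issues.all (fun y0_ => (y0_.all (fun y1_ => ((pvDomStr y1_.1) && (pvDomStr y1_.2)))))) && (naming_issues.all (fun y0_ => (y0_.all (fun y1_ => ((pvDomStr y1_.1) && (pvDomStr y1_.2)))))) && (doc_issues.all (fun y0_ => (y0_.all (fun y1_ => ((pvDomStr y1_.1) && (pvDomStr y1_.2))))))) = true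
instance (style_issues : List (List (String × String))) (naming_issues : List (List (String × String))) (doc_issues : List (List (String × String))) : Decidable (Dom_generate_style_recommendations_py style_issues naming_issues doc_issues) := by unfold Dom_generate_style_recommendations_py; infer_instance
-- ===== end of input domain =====

-- B replaces A's two any() scans and hard-coded if/append chain for style messages by a
-- rules table plus a single pending-set worklist pass with early exit (objective: alternative).

-- ===== PORT A =====
-- A: two any() scans of style_issues, then conditional appends, then the empty fallback.
def generate_style_recommendations_py (style_issues : List (List (String × String))) (naming_issues : List (List (String × String))) (doc_issues : List (List (String × String))) : List String :=
  let recommendations : List String := []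
  let recommendations :=
    if style_issues.any (fun issue => (PySem.Dict.mk issue).getD "type" "" == "line_length") then
      recommendations ++ ["Consider breaking long lines to improve readability"]
    else recommendations
  let recommendations :=
    if style_issues.any (fun issue => (PySem.Dict.mk issue).getD "type" "" == "indentation") then
      recommendations ++ ["Use consistent indentation (4 spaces recommended for Python)"]
    else recommendations
  let recommendations :=
    if naming_issues ≠ [] then
      recommendations ++ ["Follow language naming conventions (snake_case for functions, PascalCase for classes)"]
    else recommendations
  let recommendations :=
    if doc_issues ≠ [] then
      recommendations ++ ["Add docstrings to functions and classes for better documentation"]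
    else recommendations
  if recommendations = [] then ["Code follows good style practices"] else recommendations

-- ===== PORT B =====
-- B's rules table _STYLE_RULES.
def pvStyleRules : List (String × String) :=
  [("line_length", "Consider breaking long lines to improve readability"),
   ("indentation", "Use consistent indentation (4 spaces recommended for Python)")]

-- B's worklist loop: 'for issue in style_issues: if not pending: break; pending.discard(issue["type"])'.
def pvPendingLoop : List (List (String × String)) → PySem.Set String → PySem.Set String
  | [], pending => pending
  | issue :: rest, pending =>
    if pending.isEmpty then pending
    else pvPendingLoop rest (PySem.Set.discard pending ((PySem.Dict.mk issue).getD "type" ""))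

-- B: pending-set worklist over style_issues, then messages filtered from the rules table.
def generate_style_recommendations_py_alt (style_issues : List (List (String × String))) (naming_issues : List (List (String × String))) (doc_issues : List (List (String × String))) : List String :=
  let pending := pvPendingLoop style_issues (PySem.Set.ofList (pvStyleRules.map Prod.fst))
  let recommendations := (pvStyleRules.filter (fun r => !(PySem.Set.contains pending r.1))).map Prod.snd
  let recommendations :=
    if naming_issues ≠ [] then
      recommendations ++ ["Follow language naming conventions (snake_case for functions, PascalCase for classes)"]
    else recommendations
  let recommendations :=
    if doc_issues ≠ [] then
      recommendations ++ ["Add docstrings to functions and classes for better documentation"]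
    else recommendations
  if recommendations = [] then ["Code follows good style practices"] else recommendations

-- ===== PRECONDITION & SPEC =====
-- Pre_ excludes style_issues lists containing a dict without a "type" key: on those the
-- Python code (A and B alike) raises KeyError unless scanning short-circuits first.
def Pre_generate_style_recommendations_py (style_issues : List (List (String × String))) (naming_issues : List (List (String × String))) (doc_issues : List (List (String × String))) : Prop :=
  ∀ issue ∈ style_issues, (PySem.Dict.mk issue).contains "type" = true
instance (style_issues : List (List (String × String))) (naming_issues : List (List (String × String))) (doc_issues : List (List (String × String))) : Decidable (Pre_generate_style_recommendations_py style_issues naming_issues doc_issues) := by unfold Pre_generate_style_recommendations_py; infer_instance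
def pvWitness_generate_style_recommendations_py : (List (List (String × String))) × (List (List (String × String))) × (List (List (String × String))) :=
  ([[("type", "line_length")], [("type", "other")]], [], [[("name", "x")]])

def Spec_generate_style_recommendations_py (style_issues : List (List (String × String))) (naming_issues : List (List (String × String))) (doc_issues : List (List (String × String))) (out : List String) : Prop := out = generate_style_recommendations_py_alt style_issues naming_issues doc_issues
instance (style_issues : List (List (String × String))) (naming_issues : List (List (String × String))) (doc_issues : List (List (String × String))) (out : List String) : Decidable (Spec_generate_style_recommendations_py style_issues naming_issues doc_issues out) := by unfold Spec_generate_style_recommendations_py; infer_instance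

-- ===== CLAIM =====
def Claim_equal_generate_style_recommendations_py : Prop := ∀ (style_issues : List (List (String × String))) (naming_issues : List (List (String × String))) (doc_issues : List (List (String × String))), Dom_generate_style_recommendations_py style_issues naming_issues doc_issues → Pre_generate_style_recommendations_py style_issues naming_issues doc_issues → Spec_generate_style_recommendations_py style_issues naming_issues doc_issues (generate_style_recommendations_py style_issues naming_issues doc_issues)

-- ===== LEMMAS AND PROOFS =====

-- Membership in the pending set after one discard step.
theorem contains_discard (s : PySem.Set String) (x t : String) :
    PySem.Set.contains (PySem.Set.discard s x) t = (PySem.Set.contains s t && !(x == t)) := by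
  rw [Bool.eq_iff_iff, Bool.and_eq_true, PySem.Set.contains_iff, PySem.Set.contains_iff,
      PySem.Set.mem_discard]
  simp [beq_eq_false_iff_ne, ne_comm]

-- B's worklist loop ends with t still pending iff it was pending and no scanned issue has type t.
theorem contains_pendingLoop (l : List (List (String × String))) (pending : PySem.Set String) (t : String) :
    PySem.Set.contains (pvPendingLoop l pending) t
      = (PySem.Set.contains pending t
          && !(l.any (fun issue => (PySem.Dict.mk issue).getD "type" "" == t))) := by
  induction l generalizing pending with
  | nil => simp [pvPendingLoop]
  | cons x xs ih =>
    simp only [pvPendingLoop, List.any_cons]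
    by_cases he : pending.isEmpty
    · have : pending = [] := List.isEmpty_iff.mp he
      subst this
      simp [he, PySem.Set.contains]
    · rw [if_neg he, ih, contains_discard]
      cases hc : PySem.Set.contains pending t <;>
      cases h1 : ((PySem.Dict.mk x).getD "type" "" == t) <;> simp

-- ===== VERDICT =====
theorem generate_style_recommendations_py_spec : Claim_equal_generate_style_recommendations_py := by
  intro style_issues naming_issues doc_issues _ _
  unfold Spec_generate_style_recommendations_py
  unfold generate_style_recommendations_py generate_style_recommendations_py_alt
  simp only [pvStyleRules, List.map_cons, List.map_nil, List.filter_cons, List.filter_nil,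
    contains_pendingLoop]
  by_cases hA : style_issues.any (fun issue => (PySem.Dict.mk issue).getD "type" "" == "line_length") <;>
  by_cases hB : style_issues.any (fun issue => (PySem.Dict.mk issue).getD "type" "" == "indentation") <;>
  by_cases hN : naming_issues = [] <;>
  by_cases hD : doc_issues = [] <;>
  simp [hA, hB, hN, hD, PySem.Set.contains, PySem.Set.ofList]
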